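-- pv_equiv track=rewrite | github.com/gahjelle/advent_of_code | python/2019/06_universal_orbit_map/aoc201906.py | construct_orbit_map
-- ===== SOURCE A (Python) =====
-- import collections
--
-- def construct_orbit_map(orbits, start="COM"):
--     """Construct the full map of orbits.
--
--     ## Example:
--
--     >>> orbits = {"B": "A", "C": "B", "D": "C", "E": "B"}
--     >>> construct_orbit_map(orbits, start="A")
--     {'A': [], 'B': ['B'], 'C': ['B', 'C'], 'E': ['B', 'E'], 'D': ['B', 'C', 'D']}
--     """
--     queue = collections.deque([(start, [])])
--     orbit_map = {}
--     while queue: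
--         location, path = queue.popleft()
--         orbit_map[location] = path
--
--         for orbit, center in orbits.items():
--             if center == location:
--                 queue.append((orbit, path + [orbit]))
--
--     return orbit_map
-- ===== SOURCE B (Python) =====
-- import collections
--
-- def construct_orbit_map(orbits, start="COM"):
--     # Generation-by-generation BFS: index children once, then expand whole levels
--     # with a comprehension instead of popping nodes one at a time from a deque.
--     children = {}
--     for orbit, center in orbits.items():
--         children.setdefault(center, []).append(orbit)
--     orbit_map = {}
--     level = [(start, [])]
--     while level:
--         for location, path in level:
--             orbit_map[location] = path
--         level = [(orbit, path + [orbit])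
--                  for location, path in level
--                  for orbit in children.get(location, [])]
--     return orbit_map
-- ===== Notes on version B (the rewrite author's own statement) =====
-- stated objective: alternative
-- what changed: B precomputes a center->children index once and runs the BFS generation by generation (record a whole level, then expand it with a comprehension), instead of A's deque that pops one node at a time and rescans every orbit pair per popped node.
import Mathlib
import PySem

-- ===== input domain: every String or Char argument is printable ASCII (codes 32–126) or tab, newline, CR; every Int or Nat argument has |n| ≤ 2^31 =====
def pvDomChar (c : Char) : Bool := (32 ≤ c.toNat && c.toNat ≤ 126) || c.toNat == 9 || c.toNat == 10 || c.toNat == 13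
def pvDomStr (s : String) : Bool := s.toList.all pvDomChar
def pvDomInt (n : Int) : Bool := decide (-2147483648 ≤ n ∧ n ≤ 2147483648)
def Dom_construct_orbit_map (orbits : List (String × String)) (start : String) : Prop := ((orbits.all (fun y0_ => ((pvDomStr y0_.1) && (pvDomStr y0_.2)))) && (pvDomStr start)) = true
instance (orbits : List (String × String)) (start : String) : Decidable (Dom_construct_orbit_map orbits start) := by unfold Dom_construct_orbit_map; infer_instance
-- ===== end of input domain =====

-- B replaces A's one-node-at-a-time deque BFS with a per-node rescan of all pairs by a
-- children index built once plus a generation-by-generation expansion of whole levels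
-- (objective: alternative).

-- ===== PORT A =====
-- while queue: pop (location, path); record it; scan ALL (orbit, center) pairs and enqueue matches.
-- Fuel only makes the loop total; under Pre_ (a dict-shaped acyclic orbit map) each reachable
-- node is popped exactly once, so pops ≤ |orbits| + 1 and the fuel never runs out (proved below).
def comLoopA (orbits : List (String × String)) :
    Nat → List (String × List String) → PySem.Dict String (List String) → PySem.Dict String (List String)
  | _, [], m => m
  | 0, _ :: _, m => m
  | fuel + 1, (loc, path) :: q, m =>
      comLoopA orbits fuel
        (orbits.foldl (fun qq oc => if oc.2 == loc then qq ++ [(oc.1, path ++ [oc.1])] else qq) q)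
        (m.insert loc path)

def construct_orbit_map (orbits : List (String × String)) (start : String) : List (String × List String) :=
  (comLoopA orbits (orbits.length + 1) [(start, [])] PySem.Dict.empty).items

-- ===== PORT B =====
-- children.setdefault(center, []).append(orbit), built in one pass over orbits
def childrenOf (orbits : List (String × String)) : PySem.Dict String (List String) :=
  orbits.foldl (fun d oc => d.modify oc.2 [] (fun l => l ++ [oc.1])) PySem.Dict.empty

-- 'for location, path in level: orbit_map[location] = path'
def recordLevel (lvl : List (String × List String)) (m : PySem.Dict String (List String)) :
    PySem.Dict String (List String) :=
  lvl.foldl (fun mm lp => mm.insert lp.1 lp.2) m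

-- the level comprehension: next generation of (orbit, path + [orbit]) pairs
def expandLevel (children : PySem.Dict String (List String)) (lvl : List (String × List String)) :
    List (String × List String) :=
  lvl.flatMap (fun lp => (children.getD lp.1 []).map (fun o => (o, lp.2 ++ [o])))

-- while level: record the whole level, then expand it to the next one.
-- Fuel counts generations; under Pre_ there are at most |orbits| + 1 nonempty ones (proved below).
def comLoopB (children : PySem.Dict String (List String)) :
    Nat → List (String × List String) → PySem.Dict String (List String) → PySem.Dict String (List String)
  | _, [], m => m
  | 0, _ :: _, m => m
  | fuel + 1, lvl@(_ :: _), m =>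
      comLoopB children fuel (expandLevel children lvl) (recordLevel lvl m)

def construct_orbit_map_alt (orbits : List (String × String)) (start : String) : List (String × List String) :=
  (comLoopB (childrenOf orbits) (orbits.length + 1) [(start, [])] PySem.Dict.empty).items

-- ===== PRECONDITION & SPEC =====
-- first pair whose key is x: the (unique, under Nodup) center that x orbits
def parentOf (orbits : List (String × String)) (x : String) : Option String :=
  (orbits.find? (fun oc => oc.1 == x)).map (fun oc => oc.2)

-- Pre_ restricts to well-formed orbit maps: distinct orbiter keys (every Python dict input has
-- them; a list with duplicate keys represents no dict) and no orbit cycle through start (a set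
-- of keys containing start on which the parent map is a closed injection is exactly a union of
-- cycles through start; there Python A's BFS re-enqueues start forever and never returns).
def Pre_construct_orbit_map (orbits : List (String × String)) (start : String) : Prop :=
  (orbits.map Prod.fst).Nodup ∧
    ¬ ∃ S ∈ ((orbits.map Prod.fst).toFinset).powerset, start ∈ S ∧
        (∀ x ∈ S, ∃ p, parentOf orbits x = some p ∧ p ∈ S) ∧
        (∀ x ∈ S, ∀ y ∈ S, parentOf orbits x = parentOf orbits y → x = y)
instance (orbits : List (String × String)) (start : String) : Decidable (Pre_construct_orbit_map orbits start) := by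
  unfold Pre_construct_orbit_map; infer_instance

def pvWitness_construct_orbit_map : (List (String × String)) × String :=
  ([("B", "A"), ("C", "B"), ("D", "C"), ("E", "B")], "A")

def Spec_construct_orbit_map (orbits : List (String × String)) (start : String) (out : List (String × List String)) : Prop := out = construct_orbit_map_alt orbits start
instance (orbits : List (String × String)) (start : String) (out : List (String × List String)) : Decidable (Spec_construct_orbit_map orbits start out) := by unfold Spec_construct_orbit_map; infer_instance

-- ===== CLAIM (what is proved, stated in full; the proofs are below) =====
def Claim_equal_construct_orbit_map : Prop := ∀ (orbits : List (String × String)) (start : String), Dom_construct_orbit_map orbits start → Pre_construct_orbit_map orbits start → Spec_construct_orbit_map orbits start (construct_orbit_map orbits start)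

-- ===== LEMMAS AND PROOFS =====

-- children of l, read off the orbits list directly
def childNames (orbits : List (String × String)) (l : String) : List String :=
  (orbits.filter (fun oc => oc.2 == l)).map (fun oc => oc.1)

-- A's expansion of a level, written with filter/map
def expandF (orbits : List (String × String)) (lvl : List (String × List String)) :
    List (String × List String) :=
  lvl.flatMap (fun lp => (childNames orbits lp.1).map (fun o => (o, lp.2 ++ [o])))

theorem childrenOf_getD (orbits : List (String × String)) (loc : String) :
    (childrenOf orbits).getD loc [] = childNames orbits loc := by
  have h := PySem.Dict.getD_foldl_modify_append
    (l := orbits.map (fun oc => (oc.2, oc.1))) (d := PySem.Dict.empty) (c := loc)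
  simp only [List.foldl_map] at h
  unfold childrenOf childNames
  rw [h]
  simp [List.filter_map, Function.comp_def]

theorem expandLevel_eq (orbits : List (String × String)) (lvl : List (String × List String)) :
    expandLevel (childrenOf orbits) lvl = expandF orbits lvl := by
  unfold expandLevel expandF
  simp [childrenOf_getD]

-- A's inner scan appends exactly the expansion of the popped node
theorem innerScan_eq (orbits : List (String × String)) (loc : String) (path : List String)
    (q : List (String × List String)) :
    orbits.foldl (fun qq oc => if oc.2 == loc then qq ++ [(oc.1, path ++ [oc.1])] else qq) q
      = q ++ (childNames orbits loc).map (fun o => (o, path ++ [o])) := by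
  rw [PySem.List.foldl_append_if]
  unfold childNames
  simp [List.map_map, Function.comp_def]

-- A, given one whole level at the head of its queue, processes it into record + expansion
theorem comLoopA_level (orbits : List (String × String)) :
    ∀ (lvl E : List (String × List String)) (m : PySem.Dict String (List String)) (fuel : Nat),
      comLoopA orbits (lvl.length + fuel) (lvl ++ E) m
        = comLoopA orbits fuel (E ++ expandF orbits lvl) (recordLevel lvl m) := by
  intro lvl
  induction lvl with
  | nil => intro E m fuel; simp [expandF, recordLevel]
  | cons hd t ih =>
      intro E m fuel
      obtain ⟨l, p⟩ := hd
      have hlen : ((l, p) :: t).length + fuel = (t.length + fuel) + 1 := by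
        simp [List.length_cons]; omega
      rw [hlen]
      show comLoopA orbits (t.length + fuel)
          (orbits.foldl (fun qq oc => if oc.2 == l then qq ++ [(oc.1, p ++ [oc.1])] else qq) (t ++ E))
          (m.insert l p)
        = comLoopA orbits fuel (E ++ expandF orbits ((l, p) :: t)) (recordLevel ((l, p) :: t) m)
      rw [innerScan_eq, List.append_assoc, ih]
      have h1 : expandF orbits ((l, p) :: t)
          = (childNames orbits l).map (fun o => (o, p ++ [o])) ++ expandF orbits t := by
        simp [expandF]
      have h2 : recordLevel ((l, p) :: t) m = recordLevel t (m.insert l p) := rfl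
      rw [h1, h2, List.append_assoc]

-- total pops A makes in the first j generations
def sumPops (orbits : List (String × String)) : Nat → List (String × List String) → Nat
  | 0, _ => 0
  | j + 1, lvl => lvl.length + sumPops orbits j (expandF orbits lvl)

-- the two loops agree whenever the expansion dies out within the available fuel
theorem loops_agree (orbits : List (String × String)) :
    ∀ (j : Nat) (lvl : List (String × List String)) (m : PySem.Dict String (List String))
      (fA fB : Nat), (expandF orbits)^[j] lvl = [] → j ≤ fB → sumPops orbits j lvl ≤ fA →
      comLoopA orbits fA lvl m = comLoopB (childrenOf orbits) fB lvl m := by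
  intro j
  induction j with
  | zero =>
      intro lvl m fA fB hempty _ _
      rw [Function.iterate_zero_apply] at hempty
      subst hempty
      cases fA <;> cases fB <;> rfl
  | succ j ih =>
      intro lvl m fA fB hempty hjB hpops
      cases lvl with
      | nil => cases fA <;> cases fB <;> rfl
      | cons hd t =>
          cases fB with
          | zero => omega
          | succ fB' =>
              have hlt : (hd :: t).length ≤ fA := by
                have := hpops
                simp only [sumPops] at this
                omega
              have hfa : fA = (hd :: t).length + (fA - (hd :: t).length) := by omega
              rw [hfa]
              have hA := comLoopA_level orbits (hd :: t) [] m (fA - (hd :: t).length)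
              rw [List.append_nil] at hA
              rw [hA, List.nil_append]
              have hB : comLoopB (childrenOf orbits) (fB' + 1) (hd :: t) m
                  = comLoopB (childrenOf orbits) fB' (expandLevel (childrenOf orbits) (hd :: t))
                      (recordLevel (hd :: t) m) := rfl
              rw [hB, expandLevel_eq]
              apply ih
              · rw [← Function.iterate_succ_apply]; exact hempty
              · omega
              · have := hpops
                simp only [sumPops] at this
                omega

-- ===== termination under Pre_ =====

def lvlsOf (orbits : List (String × String)) (start : String) (i : Nat) :
    List (String × List String) :=
  (expandF orbits)^[i] [(start, [])]

def namesOf (orbits : List (String × String)) (start : String) (i : Nat) : List String :=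
  (lvlsOf orbits start i).map Prod.fst

-- all node names recorded in the first k generations
def allNs (orbits : List (String × String)) (start : String) : Nat → List String
  | 0 => []
  | k + 1 => allNs orbits start k ++ namesOf orbits start k

theorem mem_childNames (orbits : List (String × String)) (l c : String) :
    c ∈ childNames orbits l ↔ (c, l) ∈ orbits := by
  unfold childNames
  constructor
  · intro h
    simp only [List.mem_map, List.mem_filter] at h
    obtain ⟨oc, ⟨hmem, heq⟩, hfst⟩ := h
    have : oc = (c, l) := by
      cases oc; simp_all
    exact this ▸ hmem
  · intro h
    simp only [List.mem_map, List.mem_filter]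
    exact ⟨(c, l), ⟨h, by simp⟩, rfl⟩

theorem unique_center (orbits : List (String × String))
    (hn : (orbits.map Prod.fst).Nodup) {c l l' : String}
    (h1 : (c, l) ∈ orbits) (h2 : (c, l') ∈ orbits) : l = l' := by
  have := List.inj_on_of_nodup_map hn h1 h2 rfl
  exact congrArg Prod.snd this

theorem parentOf_eq (orbits : List (String × String))
    (hn : (orbits.map Prod.fst).Nodup) {c l : String} (h : (c, l) ∈ orbits) :
    parentOf orbits c = some l := by
  induction orbits with
  | nil => cases h
  | cons oc t ih =>
      obtain ⟨a, b⟩ := oc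
      simp only [List.map_cons, List.nodup_cons] at hn
      by_cases hac : a = c
      · rcases List.mem_cons.mp h with heq | hmem
        · rw [← heq]; simp [parentOf, List.find?]
        · rw [hac] at hn
          exact absurd (List.mem_map.mpr ⟨(c, l), hmem, rfl⟩) hn.1
      · have hmem : (c, l) ∈ t := by
          rcases List.mem_cons.mp h with heq | hmem
          · exact absurd (congrArg Prod.fst heq).symm hac
          · exact hmem
        have := ih hn.2 hmem
        simp only [parentOf, List.find?] at this ⊢
        have : ((a, b).1 == c) = false := by simpa using hac
        simp only [this]
        exact ih hn.2 hmem

theorem names_succ (orbits : List (String × String)) (start : String) (i : Nat) :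
    namesOf orbits start (i + 1) = (namesOf orbits start i).flatMap (childNames orbits) := by
  unfold namesOf lvlsOf
  rw [Function.iterate_succ_apply']
  simp [expandF, List.map_flatMap, List.map_map, Function.comp_def, List.flatMap_map]

-- every name at level i+1 has its (unique) center at level i
theorem mem_names_succ (orbits : List (String × String)) (start : String) {i : Nat} {c : String}
    (h : c ∈ namesOf orbits start (i + 1)) :
    ∃ l ∈ namesOf orbits start i, (c, l) ∈ orbits := by
  rw [names_succ, List.mem_flatMap] at h
  obtain ⟨l, hl, hc⟩ := h
  exact ⟨l, hl, (mem_childNames orbits l c).mp hc⟩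

theorem mem_allNs (orbits : List (String × String)) (start : String) {k i : Nat} {x : String}
    (hi : i < k) (h : x ∈ namesOf orbits start i) : x ∈ allNs orbits start k := by
  induction k with
  | zero => omega
  | succ k ihk =>
      simp only [allNs, List.mem_append]
      by_cases hik : i = k
      · subst hik; exact Or.inr h
      · exact Or.inl (ihk (by omega))

theorem allNs_mem_iff (orbits : List (String × String)) (start : String) (k : Nat) (x : String) :
    x ∈ allNs orbits start k ↔ ∃ i < k, x ∈ namesOf orbits start i := by
  induction k with
  | zero => simp [allNs]
  | succ k ih =>
      simp only [allNs, List.mem_append, ih]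
      constructor
      · rintro (⟨i, hi, hx⟩ | hx)
        · exact ⟨i, by omega, hx⟩
        · exact ⟨k, by omega, hx⟩
      · rintro ⟨i, hi, hx⟩
        by_cases hik : i = k
        · subst hik; exact Or.inr hx
        · exact Or.inl ⟨i, by omega, hx⟩

theorem nodup_childNames (orbits : List (String × String))
    (hn : (orbits.map Prod.fst).Nodup) (l : String) : (childNames orbits l).Nodup := by
  unfold childNames
  have hfs : (List.filter (fun oc => oc.2 == l) orbits).Sublist orbits :=
    List.filter_sublist (p := fun oc => oc.2 == l) (l := orbits)
  have hs := List.Sublist.map (fun oc : String × String => oc.1) hfs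
  exact List.Nodup.sublist hs (by simpa [Function.comp_def] using hn)

theorem childNames_disjoint (orbits : List (String × String))
    (hn : (orbits.map Prod.fst).Nodup) {l1 l2 x : String}
    (h1 : x ∈ childNames orbits l1) (h2 : x ∈ childNames orbits l2) : l1 = l2 :=
  unique_center orbits hn ((mem_childNames orbits l1 x).mp h1) ((mem_childNames orbits l2 x).mp h2)

theorem nodup_flatMap_of (f : String → List String) (ns : List String)
    (h1 : ns.Nodup) (h2 : ∀ l, (f l).Nodup)
    (h3 : ∀ l1 l2 x, x ∈ f l1 → x ∈ f l2 → l1 = l2) : (ns.flatMap f).Nodup := by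
  induction ns with
  | nil => simp
  | cons a t ih =>
      simp only [List.nodup_cons] at h1
      simp only [List.flatMap_cons]
      refine List.Nodup.append (h2 a) (ih h1.2) ?_
      intro x hxa hxt
      rw [List.mem_flatMap] at hxt
      obtain ⟨b, hb, hxb⟩ := hxt
      exact h1.1 (h3 a b x hxa hxb ▸ hb)

theorem levels_disjoint (orbits : List (String × String)) (start : String) :
    ∀ (m i i' : Nat) (x : String), (allNs orbits start m).Nodup → i < m → i' < m → i ≠ i' →
      x ∈ namesOf orbits start i → x ∈ namesOf orbits start i' → False := by
  intro m
  induction m with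
  | zero => intro i i' x _ hi; omega
  | succ m ihm =>
      intro i i' x hnd hi hi' hne hx hx'
      have hnd2 : (allNs orbits start m ++ namesOf orbits start m).Nodup := by
        simpa [allNs] using hnd
      have hdj := List.disjoint_of_nodup_append hnd2
      by_cases him : i = m
      · exact hdj (mem_allNs orbits start (show i' < m by omega) hx') (him ▸ hx)
      · by_cases him' : i' = m
        · exact hdj (mem_allNs orbits start (show i < m by omega) hx) (him' ▸ hx')
        · exact ihm i i' x hnd2.of_append_left (by omega) (by omega) hne hx hx'

theorem parentOf_mem_keys (orbits : List (String × String)) {x p : String}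
    (h : parentOf orbits x = some p) : x ∈ orbits.map Prod.fst := by
  unfold parentOf at h
  cases hfind : orbits.find? (fun oc => oc.1 == x) with
  | none => rw [hfind] at h; cases h
  | some oc =>
      have hmem := List.mem_of_find?_eq_some hfind
      have hx : oc.1 = x := by simpa using List.find?_some hfind
      exact hx ▸ List.mem_map.mpr ⟨oc, hmem, rfl⟩

-- every node of level i is the end of a parent chain g 0 = start, …, g i, descending the levels
theorem chain_to_start (orbits : List (String × String)) (start : String)
    (hkeys : (orbits.map Prod.fst).Nodup) :
    ∀ (i : Nat) (x : String), x ∈ namesOf orbits start i →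
      ∃ g : Nat → String, g i = x ∧ g 0 = start ∧
        (∀ j < i, parentOf orbits (g (j + 1)) = some (g j)) ∧
        (∀ j ≤ i, g j ∈ namesOf orbits start j) := by
  intro i
  induction i with
  | zero =>
      intro x hx
      have hxs : x = start := by simpa [namesOf, lvlsOf] using hx
      refine ⟨fun _ => start, hxs.symm, rfl, by omega, ?_⟩
      intro j hj
      have : j = 0 := by omega
      subst this
      simp [namesOf, lvlsOf]
  | succ i ihi =>
      intro x hx
      obtain ⟨l, hl, hxl⟩ := mem_names_succ orbits start hx
      obtain ⟨g', hg'i, hg'0, hg'par, hg'mem⟩ := ihi l hl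
      refine ⟨fun j => if j = i + 1 then x else g' j, by simp, ?_, ?_, ?_⟩
      · simp [hg'0]
      · intro j hj
        show parentOf orbits (if j + 1 = i + 1 then x else g' (j + 1))
          = some (if j = i + 1 then x else g' j)
        by_cases hji : j = i
        · rw [if_pos (by omega), if_neg (by omega), hji, hg'i]
          exact parentOf_eq orbits hkeys hxl
        · rw [if_neg (by omega), if_neg (by omega)]
          exact hg'par j (by omega)
      · intro j hj
        show (if j = i + 1 then x else g' j) ∈ namesOf orbits start j
        by_cases hji : j = i + 1
        · rw [if_pos hji, hji]; exact hx
        · rw [if_neg hji]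
          exact hg'mem j (by omega)

theorem allNs_nodup (orbits : List (String × String)) (start : String)
    (hpre : Pre_construct_orbit_map orbits start) (k : Nat) :
    (allNs orbits start (k + 1)).Nodup := by
  induction k with
  | zero => simp [allNs, namesOf, lvlsOf]
  | succ k ih =>
      have hkeys := hpre.1
      show (allNs orbits start (k + 1) ++ namesOf orbits start (k + 1)).Nodup
      refine List.Nodup.append ih ?_ ?_
      · -- the new level has no duplicates
        rw [names_succ]
        refine nodup_flatMap_of _ _ ?_ (nodup_childNames orbits hkeys)
            (fun l1 l2 x => childNames_disjoint orbits hkeys)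
        exact List.Nodup.of_append_right
          (show (allNs orbits start k ++ namesOf orbits start k).Nodup from
            by simpa [allNs] using ih)
      · -- the new level is disjoint from everything recorded so far
        intro x hxold hxnew
        obtain ⟨i, hi, hxi⟩ := (allNs_mem_iff orbits start (k + 1) x).mp hxold
        obtain ⟨l, hl, hxl⟩ := mem_names_succ orbits start hxnew
        cases i with
        | zero =>
            -- x = start reappears as somebody's child: the parent chain from that occurrence
            -- back down to level 0 is a cycle through start, contradicting Pre_
            have hxstart : x = start := by
              simpa [namesOf, lvlsOf] using hxi
            rw [hxstart] at hxnew
            obtain ⟨g, hgtop, hg0, hgpar, hgmem⟩ :=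
              chain_to_start orbits start hkeys (k + 1) start hxnew
            have ginj : ∀ j1 ≤ k, ∀ j2 ≤ k, g j1 = g j2 → j1 = j2 := by
              intro j1 hj1 j2 hj2 heq
              by_contra hne
              exact levels_disjoint orbits start (k + 1) j1 j2 (g j1) ih (by omega) (by omega)
                hne (hgmem j1 (by omega)) (heq ▸ hgmem j2 (by omega))
            refine hpre.2 ⟨(Finset.range (k + 1)).image g, ?_, ?_, ?_, ?_⟩
            · -- S ⊆ keys: every chain member has a parent
              rw [Finset.mem_powerset]
              intro y hy
              obtain ⟨j, hj, hjy⟩ := Finset.mem_image.mp hy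
              rw [Finset.mem_range] at hj
              rw [List.mem_toFinset, ← hjy]
              cases j with
              | zero =>
                  rw [hg0, ← hgtop]
                  exact parentOf_mem_keys orbits (hgpar k (by omega))
              | succ j' => exact parentOf_mem_keys orbits (hgpar j' (by omega))
            · exact Finset.mem_image.mpr ⟨0, Finset.mem_range.mpr (by omega), hg0⟩
            · -- closed under the parent map
              intro y hy
              obtain ⟨j, hj, hjy⟩ := Finset.mem_image.mp hy
              rw [Finset.mem_range] at hj
              cases j with
              | zero =>
                  refine ⟨g k, ?_, Finset.mem_image.mpr ⟨k, Finset.mem_range.mpr (by omega), rfl⟩⟩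
                  rw [← hjy, hg0, ← hgtop]
                  exact hgpar k (by omega)
              | succ j' =>
                  refine ⟨g j', ?_, Finset.mem_image.mpr ⟨j', Finset.mem_range.mpr (by omega), rfl⟩⟩
                  rw [← hjy]
                  exact hgpar j' (by omega)
            · -- the parent map is injective on the chain
              intro y1 hy1 y2 hy2 hpp
              obtain ⟨j1, hj1, hjy1⟩ := Finset.mem_image.mp hy1
              obtain ⟨j2, hj2, hjy2⟩ := Finset.mem_image.mp hy2
              rw [Finset.mem_range] at hj1 hj2
              have hpar : ∀ j < k + 1, parentOf orbits (g j)
                  = some (g (if j = 0 then k else j - 1)) := by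
                intro j hj
                cases j with
                | zero =>
                    rw [if_pos rfl, hg0, ← hgtop]
                    exact hgpar k (by omega)
                | succ j' =>
                    simp only [if_neg (by omega : ¬ j' + 1 = 0)]
                    have : j' + 1 - 1 = j' := by omega
                    rw [this]
                    exact hgpar j' (by omega)
              rw [← hjy1, ← hjy2, hpar j1 hj1, hpar j2 hj2] at hpp
              have hpred := ginj _ (by split <;> omega) _ (by split <;> omega)
                (Option.some.inj hpp)
              rw [← hjy1, ← hjy2]
              have : j1 = j2 := by
                by_cases h1 : j1 = 0 <;> by_cases h2 : j2 = 0 <;>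
                  simp [h1, h2] at hpred <;> omega
              rw [this]
        | succ i'' =>
            -- x sits in two levels, so its unique center sits in two earlier levels
            obtain ⟨l', hl', hxl'⟩ := mem_names_succ orbits start hxi
            have hll' : l = l' := unique_center orbits hkeys hxl hxl'
            subst hll'
            exact levels_disjoint orbits start (k + 1) k i'' l
              ih (by omega) (by omega) (by omega) hl hl'

theorem names_empty_of_le (orbits : List (String × String)) (start : String) {i j : Nat}
    (hij : i ≤ j) (h : namesOf orbits start i = []) : namesOf orbits start j = [] := by
  induction j, hij using Nat.le_induction with
  | base => exact h
  | succ j hle ihj => rw [names_succ, ihj]; rfl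


theorem sumPops_succ_back (orbits : List (String × String)) :
    ∀ (j : Nat) (lvl : List (String × List String)),
      sumPops orbits (j + 1) lvl = sumPops orbits j lvl + ((expandF orbits)^[j] lvl).length := by
  intro j
  induction j with
  | zero => intro lvl; simp [sumPops]
  | succ j ih =>
      intro lvl
      have h1 : sumPops orbits (j + 1 + 1) lvl
          = lvl.length + sumPops orbits (j + 1) (expandF orbits lvl) := rfl
      have h2 : sumPops orbits (j + 1) lvl
          = lvl.length + sumPops orbits j (expandF orbits lvl) := rfl
      rw [h1, ih, h2, Function.iterate_succ_apply]
      omega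

theorem allNs_length (orbits : List (String × String)) (start : String) (k : Nat) :
    (allNs orbits start k).length = sumPops orbits k [(start, [])] := by
  induction k with
  | zero => rfl
  | succ k ih =>
      have hnames : (namesOf orbits start k).length = ((expandF orbits)^[k] [(start, [])]).length := by
        unfold namesOf lvlsOf; simp
      simp only [allNs, List.length_append, ih, hnames, sumPops_succ_back]

theorem allNs_length_le (orbits : List (String × String)) (start : String)
    (hpre : Pre_construct_orbit_map orbits start) (k : Nat) :
    (allNs orbits start (k + 1)).length ≤ orbits.length + 1 := by
  have hnd := allNs_nodup orbits start hpre k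
  have hsub : (allNs orbits start (k + 1)).toFinset ⊆
      insert start (orbits.map Prod.fst).toFinset := by
    intro y hy
    rw [List.mem_toFinset, allNs_mem_iff] at hy
    obtain ⟨i, hi, hyi⟩ := hy
    cases i with
    | zero =>
        have : y = start := by simpa [namesOf, lvlsOf] using hyi
        simp [this]
    | succ i'' =>
        obtain ⟨l', _, hyl'⟩ := mem_names_succ orbits start hyi
        exact Finset.mem_insert_of_mem (List.mem_toFinset.mpr (List.mem_map_of_mem hyl'))
  calc (allNs orbits start (k + 1)).length
      = (allNs orbits start (k + 1)).toFinset.card := (List.toFinset_card_of_nodup hnd).symm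
    _ ≤ (insert start (orbits.map Prod.fst).toFinset).card := Finset.card_le_card hsub
    _ ≤ (orbits.map Prod.fst).toFinset.card + 1 := Finset.card_insert_le _ _
    _ ≤ (orbits.map Prod.fst).length + 1 := by
        have := List.toFinset_card_le (orbits.map Prod.fst)
        omega
    _ = orbits.length + 1 := by simp

theorem names_final_empty (orbits : List (String × String)) (start : String)
    (hpre : Pre_construct_orbit_map orbits start) :
    namesOf orbits start (orbits.length + 1) = [] := by
  by_contra hne
  have hall : ∀ i ≤ orbits.length + 1, namesOf orbits start i ≠ [] := by
    intro i hi hempty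
    exact hne (names_empty_of_le orbits start hi hempty)
  have hgrow : ∀ m, m ≤ orbits.length + 2 → m ≤ (allNs orbits start m).length := by
    intro m
    induction m with
    | zero => simp
    | succ m ihm =>
        intro hm
        have h1 := ihm (by omega)
        have h2 : (namesOf orbits start m).length ≥ 1 := by
          have := hall m (by omega)
          cases hnm : namesOf orbits start m with
          | nil => exact absurd hnm this
          | cons a t => simp
        simp only [allNs, List.length_append]
        omega
  have h1 := hgrow (orbits.length + 1 + 1) (by omega)
  have h2 := allNs_length_le orbits start hpre (orbits.length + 1)
  omega

-- ===== VERDICT (by name: the statement is the Claim_ definition above) =====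
theorem construct_orbit_map_spec : Claim_equal_construct_orbit_map := by
  intro orbits start _ hpre
  unfold Spec_construct_orbit_map construct_orbit_map construct_orbit_map_alt
  congr 1
  apply loops_agree orbits (orbits.length + 1)
  · have := names_final_empty orbits start hpre
    unfold namesOf at this
    have hlv : lvlsOf orbits start (orbits.length + 1) = [] := List.map_eq_nil_iff.mp this
    exact hlv
  · omega
  · rw [← allNs_length]
    exact allNs_length_le orbits start hpre orbits.length
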